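-- pv_equiv track=rewrite | github.com/SeongHyeon-Yun/Progarmmers | 프로그래머스/lv0/120882. 등수 매기기/등수 매기기.py | solution
-- ===== SOURCE A (Python) =====
-- def solution(score):
--     answer = []
--
--     for i in score:
--         english = i[0]
--         math = i[1]
--         rank_count = 1
--         for j in score:
--             if i != j and (english + math) < (j[0] + j[1]):
--                 rank_count += 1
--         answer.append(rank_count)
--     return answer
-- ===== SOURCE B (Python) =====
-- def solution(score):
--     sums = [s[0] + s[1] for s in score]
--     rank = {}
--     for idx, v in enumerate(sorted(sums, reverse=True)):
--         if v not in rank: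
--             rank[v] = idx + 1
--     return [rank[v] for v in sums]
-- ===== Notes on version B (the rewrite author's own statement) =====
-- stated objective: faster
-- what changed: Replaces the quadratic nested scan (for each student, re-scan all students counting strictly greater sums) by one sort of the sums plus a first-occurrence rank dictionary built in a single pass, then a lookup per student.
import Mathlib
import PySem

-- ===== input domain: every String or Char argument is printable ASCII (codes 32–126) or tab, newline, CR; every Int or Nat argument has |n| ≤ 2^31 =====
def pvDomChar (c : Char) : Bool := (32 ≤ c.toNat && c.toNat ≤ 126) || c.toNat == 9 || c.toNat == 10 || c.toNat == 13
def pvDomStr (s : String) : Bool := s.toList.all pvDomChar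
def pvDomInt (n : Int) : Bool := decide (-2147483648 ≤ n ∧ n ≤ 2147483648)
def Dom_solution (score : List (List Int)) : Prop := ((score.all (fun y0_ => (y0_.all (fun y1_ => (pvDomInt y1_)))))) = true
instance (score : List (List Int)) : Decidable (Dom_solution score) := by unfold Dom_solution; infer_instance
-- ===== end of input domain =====

-- B replaces A's quadratic nested scan by sort + first-occurrence rank dictionary (O(n log n)).

-- ===== PORT A =====
-- literal transliteration of A: for each i, rescan score counting strictly greater sums
def solution (score : List (List Int)) : List Int :=
  score.foldl (fun answer i =>
    let english := (PySem.List.pyGet? i 0).getD 0   -- i[0]; Pre_ guarantees length ≥ 2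
    let math := (PySem.List.pyGet? i 1).getD 0      -- i[1]
    let rank_count := score.foldl (fun rc j =>
      if i ≠ j ∧ english + math < (PySem.List.pyGet? j 0).getD 0 + (PySem.List.pyGet? j 1).getD 0
      then rc + 1 else rc) (1 : Int)
    answer ++ [rank_count]) []

-- ===== PORT B =====
-- literal transliteration of Source B: sums, sorted descending, first-occurrence rank dict, lookups
def solution_alt (score : List (List Int)) : List Int :=
  let sums := score.map (fun s => (PySem.List.pyGet? s 0).getD 0 + (PySem.List.pyGet? s 1).getD 0)
  let rank := (PySem.List.enumerate (PySem.List.sorted sums (fun x => x) true) 0).foldl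
      (fun d p => if d.contains p.2 then d else d.insert p.2 (p.1 + 1)) PySem.Dict.empty
  sums.map (fun v => rank.getD v 0)

-- ===== PRECONDITION & SPEC =====
-- Pre_ excludes exactly the inputs where the Pythons raise IndexError: an inner list of length < 2.
def Pre_solution (score : List (List Int)) : Prop := ∀ s ∈ score, 2 ≤ s.length
instance (score : List (List Int)) : Decidable (Pre_solution score) := by unfold Pre_solution; infer_instance
def pvWitness_solution : List (List Int) := [[1, 2], [3, 4], [3, 4], [0, 0]]
def Spec_solution (score : List (List Int)) (out : List Int) : Prop := out = solution_alt score
instance (score : List (List Int)) (out : List Int) : Decidable (Spec_solution score out) := by unfold Spec_solution; infer_instance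

-- ===== CLAIM (what is proved, stated in full; the proofs are below) =====
def Claim_equal_solution : Prop := ∀ (score : List (List Int)), Dom_solution score → Pre_solution score → Spec_solution score (solution score)

-- ===== LEMMAS AND PROOFS =====

-- the sum of the first two entries, the quantity both programs rank by
def pvSum (s : List Int) : Int := (PySem.List.pyGet? s 0).getD 0 + (PySem.List.pyGet? s 1).getD 0

-- the dict-building step of B
def pvStep (d : PySem.Dict Int Int) (p : Int × Int) : PySem.Dict Int Int :=
  if d.contains p.2 then d else d.insert p.2 (p.1 + 1)

-- a key already present is never touched again
lemma fold_pres (l : List Int) (k : Int) (d : PySem.Dict Int Int) (v : Int)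
    (h : d.contains v = true) :
    ((PySem.List.enumerate l k).foldl pvStep d).getD v 0 = d.getD v 0 := by
  induction l generalizing k d with
  | nil => simp [PySem.List.enumerate_nil]
  | cons a t ih =>
    rw [PySem.List.enumerate_cons, List.foldl_cons]
    by_cases ha : d.contains a = true
    · simp only [pvStep, ha, if_true]
      exact ih _ _ h
    · have hav : a ≠ v := fun he => by rw [he] at ha; exact ha h
      have h' : (d.insert a (k + 1)).contains v = true := by
        rw [PySem.Dict.contains_insert]; simp [h]
      simp only [pvStep]
      rw [if_neg (by simp [ha])]
      rw [ih _ _ h', PySem.Dict.getD_insert_of_ne d _ _ (Ne.symm hav)]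

-- the fold assigns to each member v of a descending list (not yet in the dict)
-- the value k + (#elements greater than v) + 1
lemma fold_rank (l : List Int) (hl : l.Pairwise (fun a b => b ≤ a)) :
    ∀ (k : Int) (d : PySem.Dict Int Int) (v : Int), v ∈ l → d.contains v = false →
    ((PySem.List.enumerate l k).foldl pvStep d).getD v 0
      = k + (l.countP (fun x => decide (v < x)) : Int) + 1 := by
  induction l with
  | nil => intro k d v hv; simp at hv
  | cons a t ih =>
    intro k d v hv hdv
    rw [List.pairwise_cons] at hl
    rw [PySem.List.enumerate_cons, List.foldl_cons]
    by_cases hav : a = v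
    · subst hav
      simp only [pvStep, hdv, if_false, Bool.false_eq_true]
      have hc : (d.insert a (k + 1)).contains a = true := PySem.Dict.contains_insert_self _ _ _
      rw [fold_pres _ _ _ _ hc, PySem.Dict.getD_insert_self]
      have hcount : t.countP (fun x => decide (a < x)) = 0 := by
        rw [List.countP_eq_zero]
        intro x hx
        simp only [decide_eq_true_eq]
        exact not_lt.mpr (hl.1 x hx)
      simp [hcount]
    · have hvt : v ∈ t := by cases hv with
        | head => exact absurd rfl hav
        | tail _ h => exact h
      have hva : v < a := lt_of_le_of_ne (hl.1 v hvt) (fun he => hav he.symm)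
      by_cases ha : d.contains a = true
      · simp only [pvStep, ha, if_true]
        rw [ih hl.2 (k + 1) d v hvt hdv]
        simp [hva]
        omega
      · simp only [pvStep]
        rw [if_neg (by simp [ha])]
        have hdv' : (d.insert a (k + 1)).contains v = false := by
          rw [PySem.Dict.contains_insert]
          simp [hdv]
          intro h
          exact hav h.symm
        rw [ih hl.2 (k + 1) (d.insert a (k + 1)) v hvt hdv']
        simp [hva]
        omega

-- B computes, for each sum v, 1 + (#sums strictly greater than v)
lemma alt_eq (score : List (List Int)) :
    solution_alt score
      = (score.map pvSum).map
          (fun v => ((score.map pvSum).countP (fun x => decide (v < x)) : Int) + 1) := by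
  unfold solution_alt
  rw [show (fun (s : List Int) =>
        (PySem.List.pyGet? s 0).getD 0 + (PySem.List.pyGet? s 1).getD 0) = pvSum from rfl]
  apply List.map_congr_left
  intro v hv
  have hperm : (PySem.List.sorted (score.map pvSum) (fun x => x) true).Perm (score.map pvSum) :=
    PySem.List.sorted_perm _ _ _
  have hvo : v ∈ PySem.List.sorted (score.map pvSum) (fun x => x) true := hperm.mem_iff.mpr hv
  have hpair : (PySem.List.sorted (score.map pvSum) (fun x => x) true).Pairwise
      (fun a b => b ≤ a) := by
    have := PySem.List.sorted_pairwise_rev (score.map pvSum) (fun x => x)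
    simpa using this
  have h := fold_rank _ hpair 0 PySem.Dict.empty v hvo (PySem.Dict.contains_empty v)
  rw [show (fun (d : PySem.Dict Int Int) (p : Int × Int) =>
        if d.contains p.2 then d else d.insert p.2 (p.1 + 1)) = pvStep from rfl]
  rw [h, hperm.countP_eq]
  omega

-- A's inner loop counts the sums strictly greater than pvSum i
-- (the guard i ≠ j is redundant: when the sums differ the lists differ)
lemma inner_count (score : List (List Int)) (i : List Int) :
    ∀ c : Int,
    score.foldl (fun rc j =>
      if i ≠ j ∧ (PySem.List.pyGet? i 0).getD 0 + (PySem.List.pyGet? i 1).getD 0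
          < (PySem.List.pyGet? j 0).getD 0 + (PySem.List.pyGet? j 1).getD 0
      then rc + 1 else rc) c
      = c + ((score.map pvSum).countP (fun x => decide (pvSum i < x)) : Int) := by
  induction score with
  | nil => intro c; simp
  | cons a t ih =>
    intro c
    rw [List.foldl_cons]
    by_cases hlt : pvSum i < pvSum a
    · have hne : i ≠ a := fun he => by rw [he] at hlt; exact lt_irrefl _ hlt
      rw [if_pos ⟨hne, show _ < _ from hlt⟩, ih]
      simp [hlt]
      omega
    · rw [if_neg (fun h => hlt h.2), ih]
      simp [hlt]

-- ===== VERDICT (by name: the statement is the Claim_ definition above) =====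
theorem solution_spec : Claim_equal_solution := by
  intro score _ _
  unfold Spec_solution
  rw [alt_eq]
  unfold solution
  rw [PySem.List.foldl_append_singleton_eq_map]
  rw [List.map_map]
  apply List.map_congr_left
  intro i hi
  simp only [Function.comp]
  rw [inner_count]
  simp only [pvSum]
  omega
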